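-- pv_equiv track=rewrite | github.com/nikolaisoerensen/MapGenerator | core/terrain_generator.py | calculate_lod_progression
-- ===== SOURCE A (Python) =====
-- from typing import Dict, List, Tuple, Optional, Any
--
-- def calculate_lod_progression(target_size: int) -> List[Tuple[int, int]]:
--     """
--     Funktionsweise: Berechnet vollständige LOD-Progression
--     Parameter: target_size - Finale Zielgröße
--     Returns: List[Tuple[int, int]] - Liste von (lod_level, size) Tupeln
--     """
--     progression = []
--     lod_level = 1
--     current_size = 32
--
--     while current_size <= target_size:
--         progression.append((lod_level, current_size))
--
--         if current_size >= target_size: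
--             break
--
--         next_size = current_size * 2
--         if next_size > target_size:
--             if current_size < target_size:
--                 lod_level += 1
--                 progression.append((lod_level, target_size))
--             break
--         else:
--             current_size = next_size
--             lod_level += 1
--
--     return progression
-- ===== SOURCE B (Python) =====
-- def calculate_lod_progression(target_size: int) -> list:
--     """Closed-form LOD progression: compute the number of doubling levels
--     directly from bit_length instead of looping/doubling."""
--     if target_size < 32:
--         return []
--     k = (target_size // 32).bit_length()
--     progression = [(i + 1, 32 << i) for i in range(k)]
--     if (32 << (k - 1)) < target_size:
--         progression.append((k + 1, target_size))
--     return progression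
-- ===== Notes on version B (the rewrite author's own statement) =====
-- stated objective: alternative
-- what changed: Replaces A's doubling while-loop with in-loop break/append special cases by a closed form: the number of levels is (target_size//32).bit_length(), the levels are produced by a comprehension, and the final partial level is appended by one post-check.
import Mathlib
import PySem

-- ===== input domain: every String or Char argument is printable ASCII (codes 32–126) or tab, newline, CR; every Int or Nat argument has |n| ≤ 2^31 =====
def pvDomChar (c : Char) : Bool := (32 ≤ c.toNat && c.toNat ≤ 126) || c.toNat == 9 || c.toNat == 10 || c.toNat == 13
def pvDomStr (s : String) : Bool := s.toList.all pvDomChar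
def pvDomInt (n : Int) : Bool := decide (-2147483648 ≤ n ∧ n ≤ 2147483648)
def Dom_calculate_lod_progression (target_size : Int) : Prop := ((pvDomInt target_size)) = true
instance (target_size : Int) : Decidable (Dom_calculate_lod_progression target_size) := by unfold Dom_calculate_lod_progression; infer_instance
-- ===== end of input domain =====

-- B replaces A's doubling while-loop by a closed form using bit_length; objective: alternative (same cost, no loop state).

-- ===== PORT A =====
-- literal transliteration of A's while-loop (break/append structure preserved);
-- the 0 < c hypothesis only justifies termination, the initial call has c = 32
def pvLoopA (t c lod : Int) (hc : 0 < c) : List (Int × Int) :=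
  if _h : c ≤ t then
    (lod, c) ::
      (if c ≥ t then []
       else
         let next_size := c * 2
         if next_size > t then
           (if c < t then [(lod + 1, t)] else [])
         else
           pvLoopA t next_size (lod + 1) (by omega))
  else []
termination_by (t - c).toNat
decreasing_by omega

def calculate_lod_progression (target_size : Int) : List (Int × Int) :=
  pvLoopA target_size 32 1 (by norm_num)

-- ===== PORT B =====
def calculate_lod_progression_alt (target_size : Int) : List (Int × Int) :=
  if target_size < 32 then []
  else
    let k := PySem.Int.bitLength (PySem.Int.floordiv target_size 32)
    let progression := (List.range k).map (fun (i : Nat) => ((i : Int) + 1, (32 : Int) <<< i))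
    if (32 : Int) <<< (k - 1) < target_size then
      progression ++ [((k : Int) + 1, target_size)]
    else progression

-- ===== PRECONDITION & SPEC =====
def Spec_calculate_lod_progression (target_size : Int) (out : List (Int × Int)) : Prop := out = calculate_lod_progression_alt target_size
instance (target_size : Int) (out : List (Int × Int)) : Decidable (Spec_calculate_lod_progression target_size out) := by unfold Spec_calculate_lod_progression; infer_instance

-- ===== CLAIM (what is proved, stated in full; the proofs are below) =====
def Claim_equal_calculate_lod_progression : Prop := ∀ (target_size : Int), Dom_calculate_lod_progression target_size → Spec_calculate_lod_progression target_size (calculate_lod_progression target_size)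

-- ===== LEMMAS AND PROOFS =====

-- quotient halving: t // (c*2) = (t // c) // 2  (for 0 < c)
theorem pv_floordiv_halve (t c : Int) (hc : 0 < c) :
    PySem.Int.floordiv (PySem.Int.floordiv t c) 2 = PySem.Int.floordiv t (c * 2) := by
  rw [PySem.Int.floordiv_eq_iff_of_pos (by omega : (0:Int) < 2)]
  constructor
  · rw [PySem.Int.le_floordiv_iff_mul_le hc]
    have h := (PySem.Int.le_floordiv_iff_mul_le (a := t) (q := PySem.Int.floordiv t (c * 2))
      (by omega : (0:Int) < c * 2)).mp le_rfl
    nlinarith [h]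
  · rw [PySem.Int.floordiv_lt_iff_lt_mul hc]
    have h := (PySem.Int.floordiv_lt_iff_lt_mul (a := t) (q := PySem.Int.floordiv t (c * 2) + 1)
      (by omega : (0:Int) < c * 2)).mp (by omega)
    nlinarith [h]

-- main loop characterisation: for 0 < c ≤ t the loop produces the closed form
theorem pvLoopA_eq (t c lod : Int) (hc : 0 < c) (hct : c ≤ t) :
    pvLoopA t c lod hc =
      (List.range (PySem.Int.bitLength (PySem.Int.floordiv t c))).map
        (fun (i : Nat) => (lod + (i : Int), c * 2 ^ i)) ++
      (if c * 2 ^ (PySem.Int.bitLength (PySem.Int.floordiv t c) - 1) < t then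
        [(lod + (PySem.Int.bitLength (PySem.Int.floordiv t c) : Int), t)]
      else []) := by
  rw [pvLoopA]
  by_cases h2 : c * 2 > t
  · -- final step: t // c = 1
    have hq : PySem.Int.floordiv t c = 1 := by
      rw [PySem.Int.floordiv_eq_iff_of_pos hc]; constructor <;> nlinarith
    rw [hq]
    have hb1 : PySem.Int.bitLength (1 : Int) = 1 := by decide
    rw [hb1]
    by_cases hlt : c < t
    · have : ¬ c ≥ t := by omega
      simp [hct, this, h2, hlt]
    · have : c ≥ t := by omega
      have hct' : c = t := by omega
      simp [hct']
  · -- recursive step: c*2 ≤ t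
    replace h2 : c * 2 ≤ t := by omega
    have hq1 : 1 ≤ PySem.Int.floordiv t c := by
      rw [PySem.Int.le_floordiv_iff_mul_le hc]; omega
    have hbl : PySem.Int.bitLength (PySem.Int.floordiv t c) =
        PySem.Int.bitLength (PySem.Int.floordiv t (c * 2)) + 1 := by
      rw [PySem.Int.bitLength_of_pos (by omega), pv_floordiv_halve t c hc]
    have hq2 : 1 ≤ PySem.Int.floordiv t (c * 2) := by
      rw [PySem.Int.le_floordiv_iff_mul_le (by omega : (0:Int) < c * 2)]; omega
    have hk1 : 1 ≤ PySem.Int.bitLength (PySem.Int.floordiv t (c * 2)) := by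
      rw [PySem.Int.bitLength_of_pos (by omega)]; omega
    have hne : ¬ c ≥ t := by omega
    have hnb : ¬ c * 2 > t := by omega
    rw [dif_pos hct]
    simp only [if_neg hne, if_neg hnb]
    rw [pvLoopA_eq t (c * 2) (lod + 1) (by omega) h2, hbl]
    set k' := PySem.Int.bitLength (PySem.Int.floordiv t (c * 2)) with hk'
    rw [List.range_succ_eq_map, List.map_cons, List.map_map]
    have hmap : (List.range k').map ((fun (i : Nat) => (lod + (i : Int), c * 2 ^ i)) ∘ Nat.succ) =
        (List.range k').map (fun (i : Nat) => (lod + 1 + (i : Int), c * 2 * 2 ^ i)) := by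
      refine List.map_congr_left (fun a _ => ?_)
      simp only [Function.comp, Nat.succ_eq_add_one, Prod.mk.injEq]
      exact ⟨by push_cast; ring, by rw [pow_succ]; ring⟩
    have hpow : c * 2 * 2 ^ (k' - 1) = c * 2 ^ (k' + 1 - 1) := by
      have : k' - 1 + 1 = k' := by omega
      calc c * 2 * 2 ^ (k' - 1) = c * 2 ^ (k' - 1 + 1) := by rw [pow_succ]; ring
        _ = c * 2 ^ (k' + 1 - 1) := by rw [this]; norm_num
    have hlod : lod + 1 + (k' : Int) = lod + ((k' + 1 : Nat) : Int) := by push_cast; ring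
    simp only [hmap, hpow, hlod, Nat.cast_zero, pow_zero, mul_one, add_zero, List.cons_append]
  termination_by (t - c).toNat
  decreasing_by omega

-- ===== VERDICT (by name: the statement is the Claim_ definition above) =====
theorem calculate_lod_progression_spec : Claim_equal_calculate_lod_progression := by
  intro t _
  unfold Spec_calculate_lod_progression calculate_lod_progression calculate_lod_progression_alt
  by_cases h : t < 32
  · rw [pvLoopA]
    simp [h, show ¬ (32 : Int) ≤ t by omega]
  · replace h : 32 ≤ t := by omega
    rw [pvLoopA_eq t 32 1 (by norm_num) h]
    simp only [show ¬ t < 32 by omega, if_false]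
    have hs : ∀ n : Nat, (32 : Int) <<< n = 32 * 2 ^ n := fun n => Int.shiftLeft_eq 32 n
    simp only [hs]
    split_ifs with hg
    · congr 1
      · refine List.map_congr_left (fun a _ => ?_)
        simp only [Prod.mk.injEq, and_true]
        ring
      · simp only [List.cons.injEq, Prod.mk.injEq, and_true]
        ring
    · rw [List.append_nil]
      refine List.map_congr_left (fun a _ => ?_)
      simp only [Prod.mk.injEq, and_true]
      ring
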